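-- pv_equiv track=rewrite | github.com/Basjohn/ShittyBruteForcer | bruteforce.py | chunked_password_space
-- ===== SOURCE A (Python) =====
-- def chunked_password_space(length, num_chunks, chunk_idx, charset):
--     total = len(charset) ** length
--     chunk_size = total // num_chunks
--     start = chunk_idx * chunk_size
--     end = (chunk_idx + 1) * chunk_size if chunk_idx < num_chunks - 1 else total
--     def idx_to_pw(idx):
--         pw = []
--         for _ in range(length):
--             pw.append(charset[idx % len(charset)])
--             idx //= len(charset)
--         return ''.join(reversed(pw))
--     return (idx_to_pw(i) for i in range(start, end))
-- ===== SOURCE B (Python) =====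
-- def chunked_password_space(length, num_chunks, chunk_idx, charset):
--     total = len(charset) ** length
--     chunk_size = total // num_chunks
--     start = chunk_idx * chunk_size
--     end = (chunk_idx + 1) * chunk_size if chunk_idx < num_chunks - 1 else total
--
--     def gen():
--         count = end - start
--         if count <= 0:
--             return
--         L = len(charset)
--         # digits of start, least-significant first; then count odometer increments
--         ds = []
--         q = start
--         for _ in range(length):
--             q, r = divmod(q, L)
--             ds.append(r)
--         for _ in range(count):
--             yield ''.join(charset[d] for d in reversed(ds))
--             ds = _incr(ds, L)
--
--     return gen()
--
--
-- def _incr(ds, L):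
--     # add one to a least-significant-first digit list, carrying; wraps at overflow
--     out = []
--     i = 0
--     while i < len(ds) and ds[i] + 1 == L:
--         out.append(0)
--         i += 1
--     if i < len(ds):
--         out.append(ds[i] + 1)
--         out.extend(ds[i + 1:])
--     return out
-- ===== Notes on version B (the rewrite author's own statement) =====
-- stated objective: alternative
-- what changed: Keeps A's chunk arithmetic but replaces the per-index base-|charset| conversion (a digit loop for every index in the chunk) by a single conversion of the start index followed by odometer increments with carry, one per emitted password.
import Mathlib
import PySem

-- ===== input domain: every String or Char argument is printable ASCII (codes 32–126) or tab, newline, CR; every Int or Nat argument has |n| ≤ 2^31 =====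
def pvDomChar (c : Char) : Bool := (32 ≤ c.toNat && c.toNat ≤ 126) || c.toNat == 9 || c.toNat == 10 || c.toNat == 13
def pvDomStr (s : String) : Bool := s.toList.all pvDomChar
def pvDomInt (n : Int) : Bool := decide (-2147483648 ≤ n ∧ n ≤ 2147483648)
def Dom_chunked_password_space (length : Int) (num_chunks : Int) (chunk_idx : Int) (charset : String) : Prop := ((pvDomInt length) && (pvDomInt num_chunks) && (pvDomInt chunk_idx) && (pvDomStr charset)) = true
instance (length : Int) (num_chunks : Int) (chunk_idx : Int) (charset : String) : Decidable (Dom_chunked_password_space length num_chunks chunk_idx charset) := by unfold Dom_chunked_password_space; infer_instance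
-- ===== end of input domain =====

-- B replaces A's per-index base-|charset| conversion (a digit loop for every index of the
-- chunk) by one conversion of `start` followed by odometer increments; proved equal on
-- Pre_ (the return value: both return generators, modelled as the list of their elements).

-- ===== PORT A =====
-- inner helper idx_to_pw: pw = []; for _ in range(length): pw.append(charset[idx % len]); idx //= len; return ''.join(reversed(pw))
-- (charset[idx % len] is always in range when the loop runs, so pyGetD's default is never used)
def pvIdxToPw (cs : List Char) (length : Int) (idx : Int) : String :=
  String.mk (((PySem.List.pyRange 0 length 1).foldl
    (fun (s : List Char × Int) _ =>
      (s.1 ++ [PySem.List.pyGetD cs (PySem.Int.mod s.2 (cs.length : Int)) ' '],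
       PySem.Int.floordiv s.2 (cs.length : Int)))
    ([], idx)).1.reverse)

def chunked_password_space (length : Int) (num_chunks : Int) (chunk_idx : Int) (charset : String) : List String :=
  let cs := charset.toList
  let total : Int := (cs.length : Int) ^ length.toNat
  let chunk_size := PySem.Int.floordiv total num_chunks
  let start := chunk_idx * chunk_size
  let «end» := if chunk_idx < num_chunks - 1 then (chunk_idx + 1) * chunk_size else total
  (PySem.List.pyRange start «end» 1).map (fun i => pvIdxToPw cs length i)

-- ===== PORT B =====
-- _incr: the while loop copies the carrying prefix (digits equal to L-1 become 0), then
-- bumps the first non-carrying digit and keeps the rest — structural recursion on the list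
def pvIncr (L : Int) : List Int → List Int
  | [] => []
  | d :: ds => if d + 1 = L then 0 :: pvIncr L ds else (d + 1) :: ds

-- ''.join(charset[d] for d in reversed(ds))  (digits are always in range, so the default is unused)
def pvRender (cs : List Char) (ds : List Int) : String :=
  String.mk (ds.reverse.map (fun d => PySem.List.pyGetD cs d ' '))

-- for _ in range(count): yield render(ds); ds = _incr(ds, L)
def pvGenLoop (cs : List Char) : Nat → List Int → List String
  | 0, _ => []
  | k + 1, ds => pvRender cs ds :: pvGenLoop cs k (pvIncr (cs.length : Int) ds)

def chunked_password_space_alt (length : Int) (num_chunks : Int) (chunk_idx : Int) (charset : String) : List String :=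
  let cs := charset.toList
  let total : Int := (cs.length : Int) ^ length.toNat
  let chunk_size := PySem.Int.floordiv total num_chunks
  let start := chunk_idx * chunk_size
  let «end» := if chunk_idx < num_chunks - 1 then (chunk_idx + 1) * chunk_size else total
  let count := «end» - start
  if count ≤ 0 then []
  else
    -- ds = []; q = start; for _ in range(length): q, r = divmod(q, L); ds.append(r)
    let ds := ((PySem.List.pyRange 0 length 1).foldl
      (fun (s : List Int × Int) _ =>
        (s.1 ++ [PySem.Int.mod s.2 (cs.length : Int)],
         PySem.Int.floordiv s.2 (cs.length : Int)))
      ([], start)).1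
    pvGenLoop cs count.toNat ds

-- ===== PRECONDITION & SPEC =====
-- Pre_ excludes exactly the inputs on which A raises when consumed: length < 0 (TypeError:
-- charset**length is a float, so range() rejects it) and num_chunks = 0 (ZeroDivisionError).
def Pre_chunked_password_space (length : Int) (num_chunks : Int) (chunk_idx : Int) (charset : String) : Prop :=
  0 ≤ length ∧ num_chunks ≠ 0
instance (length : Int) (num_chunks : Int) (chunk_idx : Int) (charset : String) : Decidable (Pre_chunked_password_space length num_chunks chunk_idx charset) := by unfold Pre_chunked_password_space; infer_instance

def pvWitness_chunked_password_space : Int × Int × Int × String := (2, 2, 1, "ab")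

def Spec_chunked_password_space (length : Int) (num_chunks : Int) (chunk_idx : Int) (charset : String) (out : List String) : Prop := out = chunked_password_space_alt length num_chunks chunk_idx charset
instance (length : Int) (num_chunks : Int) (chunk_idx : Int) (charset : String) (out : List String) : Decidable (Spec_chunked_password_space length num_chunks chunk_idx charset out) := by unfold Spec_chunked_password_space; infer_instance

-- ===== CLAIM (what is proved, stated in full; the proofs are below) =====
def Claim_equal_chunked_password_space : Prop := ∀ (length : Int) (num_chunks : Int) (chunk_idx : Int) (charset : String), Dom_chunked_password_space length num_chunks chunk_idx charset → Pre_chunked_password_space length num_chunks chunk_idx charset → Spec_chunked_password_space length num_chunks chunk_idx charset (chunked_password_space length num_chunks chunk_idx charset)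

-- ===== LEMMAS AND PROOFS =====

-- LSB character-digit list of idx in base |cs| (what A's inner loop appends, in order)
def pvLsb (cs : List Char) : Nat → Int → List Char
  | 0, _ => []
  | n + 1, idx =>
    PySem.List.pyGetD cs (PySem.Int.mod idx (cs.length : Int)) ' '
      :: pvLsb cs n (PySem.Int.floordiv idx (cs.length : Int))

-- LSB numeric digit list of idx in base |cs| (what B's digit loop appends, in order)
def pvNds (cs : List Char) : Nat → Int → List Int
  | 0, _ => []
  | n + 1, q =>
    PySem.Int.mod q (cs.length : Int) :: pvNds cs n (PySem.Int.floordiv q (cs.length : Int))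

theorem pvLoopA_eq (cs : List Char) (l : List Int) (acc : List Char) (idx : Int) :
    (l.foldl (fun (s : List Char × Int) _ =>
      (s.1 ++ [PySem.List.pyGetD cs (PySem.Int.mod s.2 (cs.length : Int)) ' '],
       PySem.Int.floordiv s.2 (cs.length : Int))) (acc, idx)).1
    = acc ++ pvLsb cs l.length idx := by
  induction l generalizing acc idx with
  | nil => simp [pvLsb]
  | cons x l ih => simp [List.foldl_cons, ih, pvLsb]

theorem pvLoopB_eq (cs : List Char) (l : List Int) (acc : List Int) (q : Int) :
    (l.foldl (fun (s : List Int × Int) _ =>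
      (s.1 ++ [PySem.Int.mod s.2 (cs.length : Int)],
       PySem.Int.floordiv s.2 (cs.length : Int))) (acc, q)).1
    = acc ++ pvNds cs l.length q := by
  induction l generalizing acc q with
  | nil => simp [pvNds]
  | cons x l ih => simp [List.foldl_cons, ih, pvNds]

theorem pvIdxToPw_eq (cs : List Char) (n : Nat) (idx : Int) :
    pvIdxToPw cs (n : Int) idx = String.mk (pvLsb cs n idx).reverse := by
  have h : (PySem.List.pyRange 0 (n : Int) 1).length = n := by
    simp [PySem.List.pyRange_one]
  rw [pvIdxToPw, pvLoopA_eq, h]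
  simp

theorem pvLsb_eq_map (cs : List Char) (n : Nat) (idx : Int) :
    pvLsb cs n idx = (pvNds cs n idx).map (fun d => PySem.List.pyGetD cs d ' ') := by
  induction n generalizing idx with
  | zero => rfl
  | succ n ih => simp [pvLsb, pvNds, ih]

theorem pvRender_eq (cs : List Char) (n : Nat) (idx : Int) :
    pvRender cs (pvNds cs n idx) = pvIdxToPw cs (n : Int) idx := by
  rw [pvIdxToPw_eq, pvRender, pvLsb_eq_map, List.map_reverse]

-- incrementing the truncated LSB digit list is adding one to the number (wrap included)
theorem pvIncr_nds (cs : List Char) (n : Nat) (q : Int) (h : 0 < cs.length ∨ n = 0) :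
    pvIncr (cs.length : Int) (pvNds cs n q) = pvNds cs n (q + 1) := by
  induction n generalizing q with
  | zero => rfl
  | succ n ih =>
    have hLnat : 0 < cs.length := by
      rcases h with h | h
      · exact h
      · exact absurd h (Nat.succ_ne_zero n)
    have hL : (0 : Int) < (cs.length : Int) := by exact_mod_cast hLnat
    have hqr := PySem.Int.floordiv_mul_add_mod q (cs.length : Int)
    have hr0 := PySem.Int.mod_nonneg q hL
    have hrL := PySem.Int.mod_lt q hL
    have hqr1 := PySem.Int.floordiv_mul_add_mod (q + 1) (cs.length : Int)
    have hr01 := PySem.Int.mod_nonneg (q + 1) hL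
    have hrL1 := PySem.Int.mod_lt (q + 1) hL
    rw [pvNds, pvNds, pvIncr]
    by_cases hc : PySem.Int.mod q (cs.length : Int) + 1 = (cs.length : Int)
    · have hf1 : PySem.Int.floordiv (q + 1) (cs.length : Int)
          = PySem.Int.floordiv q (cs.length : Int) + 1 := by
        rw [PySem.Int.floordiv_eq_iff_of_pos hL]
        constructor <;> nlinarith
      have hm1 : PySem.Int.mod (q + 1) (cs.length : Int) = 0 := by nlinarith [hf1]
      rw [if_pos hc, hm1, hf1, ih _ (Or.inl hLnat)]
    · have hclt : PySem.Int.mod q (cs.length : Int) + 1 < (cs.length : Int) := by omega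
      have hf1 : PySem.Int.floordiv (q + 1) (cs.length : Int)
          = PySem.Int.floordiv q (cs.length : Int) := by
        rw [PySem.Int.floordiv_eq_iff_of_pos hL]
        constructor <;> nlinarith
      have hm1 : PySem.Int.mod (q + 1) (cs.length : Int)
          = PySem.Int.mod q (cs.length : Int) + 1 := by nlinarith [hf1]
      rw [if_neg hc, hm1, hf1]

-- B's generator loop from the digits of s yields exactly A's map over range(s, s+k)
theorem pvGenLoop_eq (cs : List Char) (n : Nat) (h : 0 < cs.length ∨ n = 0)
    (k : Nat) (s : Int) :
    pvGenLoop cs k (pvNds cs n s)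
      = (PySem.List.pyRange s (s + (k : Int)) 1).map (fun i => pvIdxToPw cs (n : Int) i) := by
  induction k generalizing s with
  | zero =>
    rw [pvGenLoop, PySem.List.pyRange_one_eq_nil (by omega)]
    rfl
  | succ k ih =>
    rw [pvGenLoop, pvIncr_nds cs n s h, pvRender_eq,
        PySem.List.pyRange_one_cons (by omega), List.map_cons]
    rw [show s + ((k + 1 : Nat) : Int) = (s + 1) + (k : Int) by push_cast; ring]
    exact congrArg _ (ih (s + 1))

theorem pvFloordiv_zero_of_ne (b : Int) (hb : b ≠ 0) : PySem.Int.floordiv 0 b = 0 := by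
  rcases lt_or_gt_of_ne hb with h | h
  · have hqr := PySem.Int.floordiv_mul_add_mod 0 b
    have hbd := PySem.Int.mod_neg_bounds 0 (b := b) h
    rcases lt_trichotomy (PySem.Int.floordiv 0 b) 0 with hf | hf | hf
    · nlinarith [hbd.1, hbd.2]
    · exact hf
    · nlinarith [hbd.1, hbd.2]
  · rw [PySem.Int.floordiv_eq_iff_of_pos h]
    constructor <;> nlinarith

-- ===== VERDICT (by name: the statement is the Claim_ definition above) =====
theorem chunked_password_space_spec : Claim_equal_chunked_password_space := by
  intro length num_chunks chunk_idx charset _ hpre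
  obtain ⟨hlen, hnc⟩ := hpre
  obtain ⟨n, rfl⟩ : ∃ n : Nat, length = (n : Int) := ⟨length.toNat, by omega⟩
  unfold Spec_chunked_password_space chunked_password_space chunked_password_space_alt
  simp only [Int.toNat_natCast]
  set cs := charset.toList with hcs
  set total : Int := (cs.length : Int) ^ n with htot
  set csz := PySem.Int.floordiv total num_chunks with hcsz
  set s := chunk_idx * csz with hsdef
  set e := if chunk_idx < num_chunks - 1 then (chunk_idx + 1) * csz else total with hedef
  by_cases hcount : e - s ≤ 0
  · rw [if_pos hcount, PySem.List.pyRange_one_eq_nil (by omega), List.map_nil]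
  · rw [if_neg hcount]
    have hln : 0 < cs.length ∨ n = 0 := by
      by_cases hn0 : n = 0
      · exact Or.inr hn0
      · left
        by_contra hL
        have hL0 : cs.length = 0 := by omega
        have htz : total = 0 := by rw [htot, hL0]; simp [zero_pow hn0]
        have hcz : csz = 0 := by rw [hcsz, htz]; exact pvFloordiv_zero_of_ne _ hnc
        have hs0 : s = 0 := by rw [hsdef, hcz, mul_zero]
        have he0 : e = 0 := by
          rw [hedef]; split
          · rw [hcz, mul_zero]
          · exact htz
        omega
    have hfold : ((PySem.List.pyRange 0 (n : Int) 1).foldl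
        (fun (st : List Int × Int) _ =>
          (st.1 ++ [PySem.Int.mod st.2 (cs.length : Int)],
           PySem.Int.floordiv st.2 (cs.length : Int))) ([], s)).1 = pvNds cs n s := by
      have h : (PySem.List.pyRange 0 (n : Int) 1).length = n := by
        simp [PySem.List.pyRange_one]
      rw [pvLoopB_eq, h, List.nil_append]
    rw [hfold, pvGenLoop_eq cs n hln]
    rw [show s + (((e - s).toNat : Nat) : Int) = e by omega]
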